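-- pv_equiv track=rewrite | github.com/weAIDB/SurveyBench | src/quiz_based_eval/generate_questions.py | _contains_key_indicators
-- ===== SOURCE A (Python) =====
-- def _contains_key_indicators(sentence: str) -> bool:
--     """
--     检查句子是否包含关键指示词
--
--     Args:
--         sentence: 待检查的句子
--
--     Returns:
--         是否包含关键指示词
--     """
--     key_indicators = {
--         'en': ['is', 'are', 'was', 'were', 'has', 'have', 'had', 'will', 'would',
--                'can', 'could', 'should', 'must', 'may', 'might', 'for', 'because',
--                'therefore', 'however', 'moreover', 'furthermore', 'in addition',
--                'represent', 'represents', 'represented', 'use', 'used',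
--                'we', 'provide', 'provides', 'provided', 'effort', 'review', 'first']
--     }
--
--     sentence_lower = sentence.lower()
--
--     for keyword in key_indicators['en']:
--         if f' {keyword} ' in f' {sentence_lower} ':
--             return True
--
--     return False
-- ===== SOURCE B (Python) =====
-- _INDICATORS = frozenset(
--     'is are was were has have had will would can could should must may might '
--     'for because therefore however moreover furthermore represent represents '
--     'represented use used we provide provides provided effort review first'.split(' '))
--
--
-- def _contains_key_indicators(sentence: str) -> bool:
--     prev = None
--     for tok in sentence.lower().split(' '):
--         if tok in _INDICATORS or (prev == 'in' and tok == 'addition'):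
--             return True
--         prev = tok
--     return False
-- ===== Notes on version B (the rewrite author's own statement) =====
-- stated objective: faster
-- what changed: Replaces the 33 per-keyword padded-substring scans over the sentence with a single pass: tokenize the lowered sentence once with split(' ') and scan the token stream left to right, testing each token against a frozenset of the 32 single-word indicators and detecting the sole multi-word indicator 'in addition' as an adjacent ('in','addition') token pair via a prev accumulator.
import Mathlib
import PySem

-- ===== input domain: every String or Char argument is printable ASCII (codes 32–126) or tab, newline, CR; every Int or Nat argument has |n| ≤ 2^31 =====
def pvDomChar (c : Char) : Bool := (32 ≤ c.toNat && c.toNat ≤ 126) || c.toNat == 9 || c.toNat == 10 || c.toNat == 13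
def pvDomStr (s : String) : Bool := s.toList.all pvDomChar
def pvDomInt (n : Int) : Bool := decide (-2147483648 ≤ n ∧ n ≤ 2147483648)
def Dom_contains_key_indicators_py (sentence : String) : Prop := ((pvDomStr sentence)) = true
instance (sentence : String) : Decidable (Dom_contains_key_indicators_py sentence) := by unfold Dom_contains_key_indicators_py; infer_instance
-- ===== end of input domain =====

-- B replaces A's 33 per-keyword padded-substring scans by one space-tokenization of the lowered
-- sentence and a single left-to-right pass over the tokens (frozenset lookup per token, with a
-- prev accumulator detecting the adjacent pair 'in'/'addition'); exact same results.

-- ===== PORT A =====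
def pvKwsA : List String :=
  ["is", "are", "was", "were", "has", "have", "had", "will", "would",
   "can", "could", "should", "must", "may", "might", "for", "because",
   "therefore", "however", "moreover", "furthermore", "in addition",
   "represent", "represents", "represented", "use", "used",
   "we", "provide", "provides", "provided", "effort", "review", "first"]

def contains_key_indicators_py (sentence : String) : Bool :=
  let key_indicators : PySem.Dict String (List String) := PySem.Dict.ofList [("en", pvKwsA)]
  let sentence_lower := PySem.Str.lower sentence
  (PySem.Dict.getD key_indicators "en" []).any (fun keyword =>
    PySem.Chars.isIn (' ' :: (keyword.toList ++ [' '])) (' ' :: (sentence_lower.toList ++ [' '])))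

-- ===== PORT B =====
def pvIndicatorStr : String :=
  "is are was were has have had will would can could should must may might for because therefore however moreover furthermore represent represents represented use used we provide provides provided effort review first"

def pvIndicators : PySem.Set (List Char) :=
  PySem.Set.ofList (PySem.Chars.splitOn pvIndicatorStr.toList [' '])

def pvScan (prev : Option (List Char)) : List (List Char) → Bool
  | [] => false
  | tok :: rest =>
    if PySem.Set.contains pvIndicators tok ||
        (prev == some "in".toList && tok == "addition".toList) then true
    else pvScan (some tok) rest

def contains_key_indicators_py_alt (sentence : String) : Bool :=
  pvScan none (PySem.Chars.splitOn (PySem.Str.lower sentence).toList [' '])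

-- ===== PRECONDITION & SPEC =====
def Spec_contains_key_indicators_py (sentence : String) (out : Bool) : Prop := out = contains_key_indicators_py_alt sentence
instance (sentence : String) (out : Bool) : Decidable (Spec_contains_key_indicators_py sentence out) := by unfold Spec_contains_key_indicators_py; infer_instance

-- ===== CLAIM =====
def Claim_equal_contains_key_indicators_py : Prop := ∀ (sentence : String), Dom_contains_key_indicators_py sentence → Spec_contains_key_indicators_py sentence (contains_key_indicators_py sentence)

-- ===== LEMMAS AND PROOFS =====
-- pvToks is the proof-side characterisation of PySem.Chars.splitOn s [' '] (Python's split(' ')).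
def pvToks : List Char → List (List Char)
  | [] => [[]]
  | c :: t =>
    if c = ' ' then [] :: pvToks t
    else match pvToks t with
      | [] => [[c]]
      | h :: u => (c :: h) :: u

-- proof-side copy of the 32 single-word indicators
def pvSingleWords : List String :=
  ["is", "are", "was", "were", "has", "have", "had", "will", "would",
   "can", "could", "should", "must", "may", "might", "for", "because",
   "therefore", "however", "moreover", "furthermore",
   "represent", "represents", "represented", "use", "used",
   "we", "provide", "provides", "provided", "effort", "review", "first"]

-- proof-side characterisation of pvScan's pair detection
def pvHasPair : List (List Char) → Bool
  | a :: b :: r => (a == "in".toList && b == "addition".toList) || pvHasPair (b :: r)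
  | _ => false

theorem pvToks_ne_nil (l : List Char) : pvToks l ≠ [] := by
  cases l with
  | nil => simp [pvToks]
  | cons c t =>
    simp only [pvToks]
    split
    · simp
    · split <;> simp

theorem pvToks_nospace {s : List Char} (h : ' ' ∉ s) : pvToks s = [s] := by
  induction s with
  | nil => rfl
  | cons c t ih =>
    simp only [List.mem_cons, not_or] at h
    simp only [pvToks, if_neg (Ne.symm h.1), ih h.2]

theorem pvToks_split {tok : List Char} (r : List Char) (h : ' ' ∉ tok) :
    pvToks (tok ++ ' ' :: r) = tok :: pvToks r := by
  induction tok with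
  | nil => simp [pvToks]
  | cons c t ih =>
    simp only [List.mem_cons, not_or] at h
    simp only [List.cons_append, pvToks, if_neg (Ne.symm h.1), ih h.2]

theorem pvSplitFirst {s : List Char} (hsp : ' ' ∈ s) :
    ∃ tok r, ' ' ∉ tok ∧ s = tok ++ ' ' :: r := by
  cases hdw : s.dropWhile (fun c => !(c = ' ')) with
  | nil =>
    rw [List.dropWhile_eq_nil_iff] at hdw
    have := hdw ' ' hsp
    simp at this
  | cons d dr =>
    have hne' : s.dropWhile (fun c => !(c = ' ')) ≠ [] := by rw [hdw]; simp
    have hd0 := List.head_dropWhile_not (p := fun c => !(c = ' ')) (l := s) hne'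
    have hd1 : (s.dropWhile (fun c => !(c = ' '))).head hne' = d := by
      simp only [hdw, List.head_cons]
    rw [hd1] at hd0
    simp only [Bool.not_eq_false', decide_eq_true_eq] at hd0
    refine ⟨s.takeWhile (fun c => !(c = ' ')), dr, ?_, ?_⟩
    · intro hmem
      have := List.mem_takeWhile_imp hmem
      simp at this
    · conv_lhs => rw [← List.takeWhile_append_dropWhile (p := fun c => !(c = ' ')) (l := s)]
      rw [hdw, hd0]

theorem pvGo_eq (fuel : Nat) : ∀ (l cur : List Char) (acc : List (List Char)), l.length ≤ fuel →
    PySem.Chars.splitOn.go [' '] fuel l cur acc =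
      acc.reverse ++ (match pvToks l with
        | [] => []
        | h :: u => (cur.reverse ++ h) :: u) := by
  induction fuel with
  | zero =>
    intro l cur acc hl
    have : l = [] := by cases l <;> simp_all
    subst this
    simp [PySem.Chars.splitOn.go, pvToks]
  | succ n ih =>
    intro l cur acc hl
    cases l with
    | nil => simp [PySem.Chars.splitOn.go, pvToks]
    | cons c rest =>
      by_cases hc : c = ' '
      · subst hc
        rw [PySem.Chars.splitOn.go]
        simp only [List.isPrefixOf, BEq.rfl, Bool.true_and, if_true, List.length_singleton,
          List.drop_succ_cons, List.drop_zero]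
        rw [ih rest [] (cur.reverse :: acc) (by simpa using Nat.le_of_succ_le_succ hl)]
        have hne := pvToks_ne_nil rest
        cases htr : pvToks rest with
        | nil => exact absurd htr hne
        | cons h u => simp [pvToks, htr]
      · rw [PySem.Chars.splitOn.go]
        have hpre : [' '].isPrefixOf (c :: rest) = false := by
          simp [List.isPrefixOf]; exact fun h => absurd h.symm hc
        rw [hpre]
        simp only [if_false, Bool.false_eq_true]
        rw [ih rest (c :: cur) acc (by simpa using Nat.le_of_succ_le_succ hl)]
        have hne := pvToks_ne_nil rest
        cases htr : pvToks rest with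
        | nil => exact absurd htr hne
        | cons h u => simp [pvToks, htr, hc]

theorem pvSplitOn_eq (s : List Char) : PySem.Chars.splitOn s [' '] = pvToks s := by
  rw [PySem.Chars.splitOn, pvGo_eq (s.length + 1) s [] [] (Nat.le_succ _)]
  have hne := pvToks_ne_nil s
  cases h : pvToks s with
  | nil => exact absurd h hne
  | cons a u => simp

theorem pvPrefix_pad_eq : ∀ {u v : List Char} (w : List Char), ' ' ∉ u → ' ' ∉ v →
    (u ++ [' ']) <+: (v ++ ' ' :: w) → u = v := by
  intro u
  induction u with
  | nil =>
    intro v w _ hv h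
    cases v with
    | nil => rfl
    | cons c v' =>
      obtain ⟨t, ht⟩ := h
      simp only [List.nil_append, List.cons_append] at ht
      have : c = ' ' := by injection ht with h1 _; exact h1.symm
      exact absurd (this ▸ List.mem_cons_self) hv
  | cons a u' ih =>
    intro v w hu hv h
    simp only [List.mem_cons, not_or] at hu
    cases v with
    | nil =>
      obtain ⟨t, ht⟩ := h
      simp only [List.cons_append, List.nil_append] at ht
      injection ht with h1 _
      exact absurd h1 (Ne.symm hu.1)
    | cons c v' =>
      simp only [List.mem_cons, not_or] at hv
      obtain ⟨t, ht⟩ := h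
      simp only [List.cons_append] at ht
      injection ht with h1 h2
      subst h1
      have : u' = v' := ih w hu.2 hv.2 ⟨t, h2⟩
      rw [this]

theorem pvInfix_nospace {kw s : List Char} (hkw : ' ' ∉ kw) (hs : ' ' ∉ s) :
    ((' ' :: (kw ++ [' '])) <:+: (' ' :: (s ++ [' ']))) ↔ kw = s := by
  constructor
  · rintro ⟨l, u, hlu⟩
    cases l with
    | nil =>
      simp only [List.nil_append, List.cons_append] at hlu
      injection hlu with _ h2
      have hpre : (kw ++ [' ']) <+: (s ++ ' ' :: []) := ⟨u, by simpa using h2⟩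
      exact pvPrefix_pad_eq [] hkw hs hpre
    | cons x l' =>
      simp only [List.cons_append, List.append_assoc] at hlu
      injection hlu with h1 h2
      exfalso
      have hl' : l' <+: (s ++ [' ']) := ⟨' ' :: (kw ++ [' ']) ++ u, by rw [← h2]; simp⟩
      have hsp : s <+: (s ++ [' ']) := ⟨[' '], rfl⟩
      rcases List.prefix_or_prefix_of_prefix hl' hsp with hc | hc
      · obtain ⟨m, hm⟩ := hc
        rw [← hm, List.append_assoc] at h2
        have h3 := List.append_cancel_left h2
        cases m with
        | nil =>
          have hlen := congrArg List.length h3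
          simp at hlen
        | cons y m' =>
          injection h3 with hy _
          apply hs
          rw [← hm]
          exact List.mem_append_right _ (by rw [← hy]; exact List.mem_cons_self)
      · obtain ⟨m, hm⟩ := hc
        rw [← hm, List.append_assoc] at h2
        have h3 := List.append_cancel_left h2
        have hlen := congrArg List.length h3
        simp at hlen
        omega
  · rintro rfl
    exact ⟨[], [], by simp⟩

theorem pvInfix_split {kw tok : List Char} (r : List Char) (hkw : ' ' ∉ kw) (htok : ' ' ∉ tok) :
    ((' ' :: (kw ++ [' '])) <:+: (' ' :: ((tok ++ ' ' :: r) ++ [' ']))) ↔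
      kw = tok ∨ ((' ' :: (kw ++ [' '])) <:+: (' ' :: (r ++ [' ']))) := by
  constructor
  · rintro ⟨l, u, hlu⟩
    cases l with
    | nil =>
      simp only [List.nil_append, List.cons_append, List.append_assoc] at hlu
      injection hlu with _ h2
      exact Or.inl (pvPrefix_pad_eq (r ++ [' ']) hkw htok ⟨u, by simpa using h2⟩)
    | cons x l' =>
      simp only [List.cons_append, List.append_assoc] at hlu
      injection hlu with h1 h2
      have hl' : l' <+: (tok ++ ' ' :: (r ++ [' '])) := ⟨_, h2⟩
      have htp : tok <+: (tok ++ ' ' :: (r ++ [' '])) := ⟨_, rfl⟩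
      rcases List.prefix_or_prefix_of_prefix hl' htp with hc | hc
      · obtain ⟨m, hm⟩ := hc
        rw [← hm, List.append_assoc] at h2
        have h3 := List.append_cancel_left h2
        cases m with
        | nil =>
          simp only [List.nil_append] at h3
          injection h3 with _ h4
          exact Or.inr ⟨[], u, by simp [← h4]⟩
        | cons y m' =>
          injection h3 with hy _
          exact absurd (hm ▸ List.mem_append_right l' (hy ▸ List.mem_cons_self)) htok
      · obtain ⟨m, hm⟩ := hc
        rw [← hm, List.append_assoc] at h2
        have h3 := List.append_cancel_left h2
        cases m with
        | nil =>
          simp only [List.nil_append] at h3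
          injection h3 with _ h4
          exact Or.inr ⟨[], u, by simp [← h4]⟩
        | cons y m' =>
          injection h3 with hy h4
          refine Or.inr (List.IsInfix.trans ⟨m', u, ?_⟩ (List.IsSuffix.isInfix ⟨[' '], rfl⟩))
          simpa using h4
  · rintro (rfl | h)
    · exact ⟨[], r ++ [' '], by simp⟩
    · exact h.trans (List.IsSuffix.isInfix ⟨' ' :: tok, by simp⟩)

theorem pvMain {kw : List Char} (hkw : ' ' ∉ kw) : ∀ (s : List Char),
    ((' ' :: (kw ++ [' '])) <:+: (' ' :: (s ++ [' ']))) ↔ kw ∈ pvToks s := by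
  intro s
  induction hn : s.length using Nat.strong_induction_on generalizing s with
  | _ n ih =>
    by_cases hsp : ' ' ∈ s
    · obtain ⟨tok, r, htok, hs⟩ := pvSplitFirst hsp
      subst hs
      rw [pvInfix_split r hkw htok, pvToks_split r htok]
      have hlen : r.length < n := by
        subst hn; simp; omega
      rw [ih r.length hlen r rfl]
      simp
    · rw [pvInfix_nospace hkw hsp, pvToks_nospace hsp]
      simp

-- first token of r, read off a padded prefix
theorem pvFirstTok {k r : List Char} (hk : ' ' ∉ k) (h : (k ++ [' ']) <+: (r ++ [' '])) :
    ∃ rest, pvToks r = k :: rest := by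
  by_cases hsp : ' ' ∈ r
  · obtain ⟨t, r', ht, rfl⟩ := pvSplitFirst hsp
    have : (k ++ [' ']) <+: (t ++ ' ' :: (r' ++ [' '])) := by simpa using h
    have := pvPrefix_pad_eq (r' ++ [' ']) hk ht this
    subst this
    exact ⟨pvToks r', pvToks_split r' ht⟩
  · have : (k ++ [' ']) <+: (r ++ ' ' :: []) := by simpa using h
    have := pvPrefix_pad_eq [] hk hsp this
    subst this
    exact ⟨[], pvToks_nospace hsp⟩

theorem pvFirstTok_rev {k r : List Char} {rest : List (List Char)} (hk : ' ' ∉ k)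
    (h : pvToks r = k :: rest) : (k ++ [' ']) <+: (r ++ [' ']) := by
  by_cases hsp : ' ' ∈ r
  · obtain ⟨t, r', ht, rfl⟩ := pvSplitFirst hsp
    rw [pvToks_split r' ht] at h
    injection h with h1 _
    subst h1
    exact ⟨r' ++ [' '], by simp⟩
  · rw [pvToks_nospace hsp] at h
    injection h with h1 _
    subst h1
    exact ⟨[], by simp⟩

-- ' <k1> <k2> ' occurs in the padded sentence iff k1,k2 are adjacent tokens
theorem pvPairMain {k1 k2 : List Char} (h1 : ' ' ∉ k1) (h2 : ' ' ∉ k2) : ∀ (s : List Char),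
    ((' ' :: (k1 ++ ' ' :: (k2 ++ [' ']))) <:+: (' ' :: (s ++ [' ']))) ↔
      ∃ l u, pvToks s = l ++ k1 :: k2 :: u := by
  intro s
  induction hn : s.length using Nat.strong_induction_on generalizing s with
  | _ n ih =>
    by_cases hsp : ' ' ∈ s
    · obtain ⟨tok, r, htok, hs⟩ := pvSplitFirst hsp
      subst hs
      have hassoc : (tok ++ ' ' :: r) ++ [' '] = tok ++ ' ' :: (r ++ [' ']) := by simp
      have hlen : r.length < n := by subst hn; simp; omega
      rw [pvToks_split r htok]
      constructor
      · rintro ⟨l, u, hlu⟩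
        rw [hassoc] at hlu
        cases l with
        | nil =>
          simp only [List.nil_append, List.cons_append] at hlu
          injection hlu with _ h2'
          have hpre1 : (k1 ++ [' ']) <+: (tok ++ ' ' :: (r ++ [' '])) :=
            ⟨(k2 ++ [' ']) ++ u, by rw [← h2']; simp⟩
          have hk1 := pvPrefix_pad_eq (r ++ [' ']) h1 htok hpre1
          subst hk1
          have h3 : ' ' :: ((k2 ++ [' ']) ++ u) = ' ' :: (r ++ [' ']) := by
            have := h2'
            rw [show k1 ++ ' ' :: (k2 ++ [' ']) ++ u = k1 ++ (' ' :: ((k2 ++ [' ']) ++ u)) by simp,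
                show k1 ++ ' ' :: (r ++ [' ']) = k1 ++ (' ' :: (r ++ [' '])) from rfl] at this
            exact List.append_cancel_left this
          injection h3 with _ h4
          obtain ⟨rest, hrest⟩ := pvFirstTok h2 ⟨u, h4⟩
          exact ⟨[], rest, by simp [hrest]⟩
        | cons x l' =>
          simp only [List.cons_append, List.append_assoc] at hlu
          injection hlu with _ h2'
          have hl' : l' <+: (tok ++ ' ' :: (r ++ [' '])) := ⟨_, h2'⟩
          have htp : tok <+: (tok ++ ' ' :: (r ++ [' '])) := ⟨_, rfl⟩
          have hrec : ((' ' :: (k1 ++ ' ' :: (k2 ++ [' ']))) <:+: (' ' :: (r ++ [' ']))) → _ :=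
            fun hh => (ih r.length hlen r rfl).mp hh
          rcases List.prefix_or_prefix_of_prefix hl' htp with hc | hc
          · obtain ⟨m, hm⟩ := hc
            rw [← hm, List.append_assoc] at h2'
            have h3 := List.append_cancel_left h2'
            cases m with
            | nil =>
              simp only [List.nil_append] at h3
              injection h3 with _ h4
              obtain ⟨l2, u2, hl2⟩ := hrec ⟨[], u, by
                simp only [List.nil_append, List.cons_append, List.append_assoc]
                rw [← h4]⟩
              exact ⟨tok :: l2, u2, by rw [hl2, List.cons_append]⟩
            | cons y m' =>
              injection h3 with hy _
              exact absurd (hm ▸ List.mem_append_right l' (hy ▸ List.mem_cons_self)) htok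
          · obtain ⟨m, hm⟩ := hc
            rw [← hm, List.append_assoc] at h2'
            have h3 := List.append_cancel_left h2'
            cases m with
            | nil =>
              simp only [List.nil_append] at h3
              injection h3 with _ h4
              obtain ⟨l2, u2, hl2⟩ := hrec ⟨[], u, by
                simp only [List.nil_append, List.cons_append, List.append_assoc]
                rw [← h4]⟩
              exact ⟨tok :: l2, u2, by rw [hl2, List.cons_append]⟩
            | cons y m' =>
              injection h3 with hy h4
              obtain ⟨l2, u2, hl2⟩ := hrec
                ((List.IsInfix.trans ⟨m', u, by simpa using h4⟩)
                  (List.IsSuffix.isInfix ⟨[' '], rfl⟩))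
              exact ⟨tok :: l2, u2, by rw [hl2, List.cons_append]⟩
      · rintro ⟨l, u, hlu⟩
        cases l with
        | nil =>
          injection hlu with ha hb
          subst ha
          obtain ⟨w, hw⟩ := pvFirstTok_rev h2 hb
          refine ⟨[], w, ?_⟩
          rw [hassoc, ← hw]
          simp
        | cons a l' =>
          injection hlu with _ hb
          have := (ih r.length hlen r rfl).mpr ⟨l', u, hb⟩
          refine this.trans (List.IsSuffix.isInfix ⟨' ' :: tok, ?_⟩)
          rw [hassoc]; simp
    · -- no space in s: pvToks s = [s], and both sides are false
      rw [pvToks_nospace hsp]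
      constructor
      · intro h
        exfalso
        have hcnt := (List.IsInfix.sublist h).count_le ' '
        simp [List.count_append, List.count_eq_zero.mpr h1,
          List.count_eq_zero.mpr h2, List.count_eq_zero.mpr hsp] at hcnt
      · rintro ⟨l, u, hlu⟩
        have := congrArg List.length hlu
        simp at this
        omega

theorem pvHasPair_iff : ∀ (ts : List (List Char)),
    pvHasPair ts = true ↔ ∃ l u, ts = l ++ "in".toList :: "addition".toList :: u := by
  intro ts
  induction ts with
  | nil =>
    simp only [pvHasPair]
    constructor
    · intro h; exact absurd h (by simp)
    · rintro ⟨l, u, h⟩; cases l <;> simp at h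
  | cons a t ih =>
    cases t with
    | nil =>
      simp only [pvHasPair]
      constructor
      · intro h; exact absurd h (by simp)
      · rintro ⟨l, u, h⟩
        cases l with
        | nil => simp at h
        | cons c l' => simp at h
    | cons b r =>
      rw [pvHasPair]
      constructor
      · intro h
        rcases Bool.or_eq_true_iff.mp h with h' | h'
        · obtain ⟨ha, hb⟩ := Bool.and_eq_true_iff.mp h'
          exact ⟨[], r, by simp [beq_iff_eq.mp ha, beq_iff_eq.mp hb]⟩
        · obtain ⟨l, u, hl⟩ := ih.mp h'
          exact ⟨a :: l, u, by rw [List.cons_append, hl]⟩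
      · rintro ⟨l, u, hl⟩
        cases l with
        | nil =>
          injection hl with ha hb
          injection hb with hb _
          simp [ha, hb]
        | cons c l' =>
          injection hl with _ hb
          exact Bool.or_eq_true_iff.mpr (Or.inr (ih.mpr ⟨l', u, hb⟩))

-- pvScan decomposed into its two concerns
theorem pvScan_some : ∀ (ts : List (List Char)) (p : List Char),
    pvScan (some p) ts =
      (ts.any (fun t => PySem.Set.contains pvIndicators t) || pvHasPair (p :: ts)) := by
  intro ts
  induction ts with
  | nil => intro p; simp [pvScan, pvHasPair]
  | cons t rest ih =>
    intro p
    rw [pvScan]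
    rw [ih t]
    rw [show pvHasPair (p :: t :: rest) =
      ((p == "in".toList && t == "addition".toList) || pvHasPair (t :: rest)) from rfl]
    have hsome : (some p == some ("in".toList)) = (p == "in".toList) := by
      cases h : p == "in".toList <;> simp_all
    rw [List.any_cons, hsome]
    cases PySem.Set.contains pvIndicators t <;>
      cases p == "in".toList <;>
      cases t == "addition".toList <;>
      simp

theorem pvScan_none : ∀ (ts : List (List Char)),
    pvScan none ts = (ts.any (fun t => PySem.Set.contains pvIndicators t) || pvHasPair ts) := by
  intro ts
  cases ts with
  | nil => simp [pvScan, pvHasPair]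
  | cons t rest =>
    rw [pvScan]
    have hnone : (none == some ("in".toList)) = false := rfl
    rw [hnone, pvScan_some rest t, List.any_cons]
    rw [show pvHasPair (t :: rest) = pvHasPair (t :: rest) from rfl]
    cases PySem.Set.contains pvIndicators t <;>
      cases h : t == "addition".toList <;> simp

theorem pvKey (w : String) (s : List Char) (h1 : ' ' ∉ w.toList) :
    PySem.Chars.isIn (' ' :: (w.toList ++ [' '])) (' ' :: (s ++ [' '])) =
      decide (w.toList ∈ pvToks s) := by
  apply Bool.eq_iff_iff.mpr
  simp only [PySem.Chars.isIn_iff_infix, decide_eq_true_eq]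
  exact pvMain h1 s

theorem pvContains (l : List (List Char)) (x : List Char) :
    PySem.Set.contains (PySem.Set.ofList l) x = decide (x ∈ l) := by
  simp only [PySem.Set.contains_eq_listContains, List.contains_eq_mem, PySem.Set.mem_ofList]

theorem pvAny_split (f : String → Bool) :
    pvKwsA.any f = (pvSingleWords.any f || f "in addition") := by
  simp only [pvKwsA, pvSingleWords, List.any_cons, List.any_nil]
  cases f "in addition" <;> simp

theorem pvSingle_facts : ∀ w ∈ pvSingleWords, ' ' ∉ w.toList := by decide

set_option maxRecDepth 20000 in
theorem pvIndList :
    PySem.Chars.splitOn pvIndicatorStr.toList [' '] = pvSingleWords.map String.toList := by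
  rw [pvSplitOn_eq]
  decide

theorem pvAnySwap (L toks : List (List Char)) :
    L.any (fun w => decide (w ∈ toks)) = toks.any (fun t => decide (t ∈ L)) := by
  apply Bool.eq_iff_iff.mpr
  simp only [List.any_eq_true, decide_eq_true_eq]
  exact ⟨fun ⟨x, h1, h2⟩ => ⟨x, h2, h1⟩, fun ⟨x, h1, h2⟩ => ⟨x, h2, h1⟩⟩

theorem pvPadIA :
    (' ' :: (("in addition").toList ++ [' '])) =
      (' ' :: ("in".toList ++ ' ' :: ("addition".toList ++ [' ']))) := by decide

theorem pvPairKey (s : List Char) :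
    PySem.Chars.isIn (' ' :: (("in addition").toList ++ [' '])) (' ' :: (s ++ [' '])) =
      pvHasPair (pvToks s) := by
  apply Bool.eq_iff_iff.mpr
  rw [pvPadIA]
  rw [PySem.Chars.isIn_iff_infix, pvHasPair_iff]
  exact pvPairMain (by decide) (by decide) s

theorem pvFinal (sentence : String) :
    contains_key_indicators_py sentence = contains_key_indicators_py_alt sentence := by
  show (pvKwsA.any fun keyword =>
      PySem.Chars.isIn (' ' :: (keyword.toList ++ [' '])) (' ' :: ((PySem.Str.lower sentence).toList ++ [' ']))) =
    pvScan none (PySem.Chars.splitOn (PySem.Str.lower sentence).toList [' '])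
  rw [pvSplitOn_eq, pvScan_none, pvAny_split, pvPairKey]
  have hsingles : (pvSingleWords.any fun w =>
      PySem.Chars.isIn (' ' :: (w.toList ++ [' '])) (' ' :: ((PySem.Str.lower sentence).toList ++ [' ']))) =
      ((pvToks (PySem.Str.lower sentence).toList).any fun t => PySem.Set.contains pvIndicators t) := by
    rw [PySem.List.any_congr_mem (fun w hw => pvKey w _ (pvSingle_facts w hw))]
    have hmap : (pvSingleWords.any fun w => decide (w.toList ∈ pvToks (PySem.Str.lower sentence).toList)) =
        ((pvSingleWords.map String.toList).any fun w => decide (w ∈ pvToks (PySem.Str.lower sentence).toList)) := by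
      rw [List.any_map]
      rfl
    rw [hmap, pvAnySwap]
    exact (PySem.List.any_congr_mem (fun t _ => by
      rw [show pvIndicators = PySem.Set.ofList (PySem.Chars.splitOn pvIndicatorStr.toList [' ']) from rfl,
        pvContains, pvIndList])).symm
  rw [hsingles]

-- ===== VERDICT =====
theorem contains_key_indicators_py_spec : Claim_equal_contains_key_indicators_py := by
  intro sentence _
  unfold Spec_contains_key_indicators_py
  exact pvFinal sentence
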